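-- pv_equiv track=rewrite | github.com/jeffreyabecker/adv-http | scripts/rewrite_test_includes_from_manifest.py | apply_mapping_to_include
-- ===== SOURCE A (Python) =====
-- def apply_mapping_to_include(inc, mapping):
--     # normalize leading ../ or ./
--     prefix = ''
--     norm = inc
--     while norm.startswith('../') or norm.startswith('./'):
--         if norm.startswith('../'):
--             prefix += '../'
--             norm = norm[len('../'):]
--         else:
--             prefix += './'
--             norm = norm[len('./'):]
--
--     # if norm starts with src/httpadv/v1/, strip that
--     if norm.startswith('src/httpadv/v1/'):
--         candidate = norm[len('src/httpadv/v1/'):]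
--     elif norm.startswith('src/'):
--         candidate = norm[len('src/'):]
--     else:
--         candidate = norm
--
--     if candidate in mapping:
--         new_rel = mapping[candidate]
--         # produce a replacement that keeps same relative prefix (../..)
--         return prefix + 'src/' + new_rel
--     return None
-- ===== SOURCE B (Python) =====
-- def apply_mapping_to_include(inc, mapping):
--     # recursive decomposition: peel one leading '../' or './' token, recurse,
--     # and re-attach it to the rewritten remainder; no prefix accumulator.
--     if inc.startswith('../'):
--         rest = apply_mapping_to_include(inc[3:], mapping)
--         return None if rest is None else '../' + rest
--     if inc.startswith('./'):
--         rest = apply_mapping_to_include(inc[2:], mapping)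
--         return None if rest is None else './' + rest
--     if inc.startswith('src/httpadv/v1/'):
--         candidate = inc[len('src/httpadv/v1/'):]
--     elif inc.startswith('src/'):
--         candidate = inc[len('src/'):]
--     else:
--         candidate = inc
--     new_rel = mapping.get(candidate)
--     return None if new_rel is None else 'src/' + new_rel
-- ===== Notes on version B (the rewrite author's own statement) =====
-- stated objective: simpler
-- what changed: The iterative while-loop that accumulates a prefix string and repeatedly reslices the input is replaced by direct recursion that peels one '../' or './' token, recurses on the remainder and re-attaches the token to the result, and the contains-then-index lookup is replaced by a single dict.get.
import Mathlib
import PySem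

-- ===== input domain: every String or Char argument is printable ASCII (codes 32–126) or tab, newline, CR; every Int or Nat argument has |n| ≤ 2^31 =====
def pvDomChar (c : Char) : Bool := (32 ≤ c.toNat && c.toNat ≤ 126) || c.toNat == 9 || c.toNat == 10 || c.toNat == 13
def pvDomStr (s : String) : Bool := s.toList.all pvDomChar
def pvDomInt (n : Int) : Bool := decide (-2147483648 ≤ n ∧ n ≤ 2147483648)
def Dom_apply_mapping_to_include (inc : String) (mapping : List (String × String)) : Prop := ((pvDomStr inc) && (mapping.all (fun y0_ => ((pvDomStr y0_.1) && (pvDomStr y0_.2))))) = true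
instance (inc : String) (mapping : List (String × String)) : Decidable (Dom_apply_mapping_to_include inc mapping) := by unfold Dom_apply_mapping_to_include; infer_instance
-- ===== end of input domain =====

-- B replaces A's prefix-accumulating while loop by direct recursion that peels one
-- leading '../' or './' token and re-attaches it to the recursive result (simpler decomposition).


-- ===== PORT A =====
-- A's while loop over the state (prefix, norm); branches in A's order
def pvStripA (pre norm : List Char) : List Char × List Char :=
  if h1 : PySem.Chars.startswith norm ("../".toList) = true then
    pvStripA (pre ++ "../".toList) (PySem.List.slice norm (some 3) none)
  else if h2 : PySem.Chars.startswith norm ("./".toList) = true then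
    pvStripA (pre ++ "./".toList) (PySem.List.slice norm (some 2) none)
  else (pre, norm)
termination_by norm.length
decreasing_by
  · obtain ⟨t, ht⟩ := (PySem.Chars.startswith_iff _ _).mp h1
    rw [← ht, PySem.List.slice_from _ (by norm_num)]
    simp
    all_goals omega
  · obtain ⟨t, ht⟩ := (PySem.Chars.startswith_iff _ _).mp h2
    rw [← ht, PySem.List.slice_from _ (by norm_num)]
    simp
    all_goals omega

def apply_mapping_to_include (inc : String) (mapping : List (String × String)) : Option String :=
  let pn := pvStripA [] inc.toList
  let norm := pn.2
  let candidate :=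
    if PySem.Chars.startswith norm ("src/httpadv/v1/".toList) then
      PySem.List.slice norm (some 15) none
    else if PySem.Chars.startswith norm ("src/".toList) then
      PySem.List.slice norm (some 4) none
    else norm
  if (PySem.Dict.mk mapping).contains (String.ofList candidate) then
    some (String.ofList (pn.1 ++ "src/".toList ++
      ((PySem.Dict.mk mapping).getD (String.ofList candidate) "").toList))
  else none

-- ===== PORT B =====
-- B's recursion: peel one token, recurse, re-attach it to the rewritten remainder
def pvAltGo (s : List Char) (mapping : List (String × String)) : Option (List Char) :=
  if h1 : PySem.Chars.startswith s ("../".toList) = true then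
    (pvAltGo (PySem.List.slice s (some 3) none) mapping).map ("../".toList ++ ·)
  else if h2 : PySem.Chars.startswith s ("./".toList) = true then
    (pvAltGo (PySem.List.slice s (some 2) none) mapping).map ("./".toList ++ ·)
  else
    let candidate :=
      if PySem.Chars.startswith s ("src/httpadv/v1/".toList) then
        PySem.List.slice s (some 15) none
      else if PySem.Chars.startswith s ("src/".toList) then
        PySem.List.slice s (some 4) none
      else s
    match (PySem.Dict.mk mapping).get? (String.ofList candidate) with
    | some new_rel => some ("src/".toList ++ new_rel.toList)
    | none => none
termination_by s.length
decreasing_by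
  · obtain ⟨t, ht⟩ := (PySem.Chars.startswith_iff _ _).mp h1
    rw [← ht, PySem.List.slice_from _ (by norm_num)]
    simp
    all_goals omega
  · obtain ⟨t, ht⟩ := (PySem.Chars.startswith_iff _ _).mp h2
    rw [← ht, PySem.List.slice_from _ (by norm_num)]
    simp
    all_goals omega

def apply_mapping_to_include_alt (inc : String) (mapping : List (String × String)) : Option String :=
  (pvAltGo inc.toList mapping).map String.ofList

-- ===== PRECONDITION & SPEC =====
def Spec_apply_mapping_to_include (inc : String) (mapping : List (String × String)) (out : Option String) : Prop := out = apply_mapping_to_include_alt inc mapping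
instance (inc : String) (mapping : List (String × String)) (out : Option String) : Decidable (Spec_apply_mapping_to_include inc mapping out) := by unfold Spec_apply_mapping_to_include; infer_instance

-- ===== CLAIM (what is proved, stated in full; the proofs are below) =====
def Claim_equal_apply_mapping_to_include : Prop := ∀ (inc : String) (mapping : List (String × String)), Dom_apply_mapping_to_include inc mapping → Spec_apply_mapping_to_include inc mapping (apply_mapping_to_include inc mapping)

-- ===== LEMMAS AND PROOFS =====

-- the tail of A's function after the loop, as a function of the loop's final state
def pvTailA (mapping : List (String × String)) (pre norm : List Char) : Option String :=
  let candidate :=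
    if PySem.Chars.startswith norm ("src/httpadv/v1/".toList) then
      PySem.List.slice norm (some 15) none
    else if PySem.Chars.startswith norm ("src/".toList) then
      PySem.List.slice norm (some 4) none
    else norm
  if (PySem.Dict.mk mapping).contains (String.ofList candidate) then
    some (String.ofList (pre ++ "src/".toList ++
      ((PySem.Dict.mk mapping).getD (String.ofList candidate) "").toList))
  else none

theorem pvA_eq_tail (inc : String) (mapping : List (String × String)) :
    apply_mapping_to_include inc mapping =
      pvTailA mapping (pvStripA [] inc.toList).1 (pvStripA [] inc.toList).2 := rfl

-- core invariant: A's loop+tail from any accumulated prefix equals B's recursion with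
-- the prefix re-attached at the end
-- the no-leading-token case: A's loop exits at once and its tail matches B's else branch
theorem pvNoTok (mapping : List (String × String)) (pre s : List Char)
    (h1 : ¬ (PySem.Chars.startswith s ("../".toList) = true))
    (h2 : ¬ (PySem.Chars.startswith s ("./".toList) = true)) :
    pvTailA mapping (pvStripA pre s).1 (pvStripA pre s).2 =
      (pvAltGo s mapping).map (fun r => String.ofList (pre ++ r)) := by
  rw [pvStripA, dif_neg h1, dif_neg h2, pvAltGo, dif_neg h1, dif_neg h2]
  unfold pvTailA
  dsimp only
  rw [PySem.Dict.contains_eq_isSome_get?, PySem.Dict.getD_eq_get?_getD]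
  cases hg : (PySem.Dict.mk mapping).get? (String.ofList
      (if PySem.Chars.startswith s ("src/httpadv/v1/".toList) = true then
        PySem.List.slice s (some 15) none
      else if PySem.Chars.startswith s ("src/".toList) = true then
        PySem.List.slice s (some 4) none
      else s)) with
  | none => simp
  | some v => simp

theorem pvLoop_eq_alt (mapping : List (String × String)) :
    ∀ (n : Nat) (s : List Char), s.length ≤ n → ∀ pre,
      pvTailA mapping (pvStripA pre s).1 (pvStripA pre s).2 =
        (pvAltGo s mapping).map (fun r => String.ofList (pre ++ r)) := by
  intro n
  induction n with
  | zero =>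
    intro s hs pre
    have : s = [] := List.eq_nil_of_length_eq_zero (Nat.le_zero.mp hs)
    subst this
    exact pvNoTok mapping pre [] (by decide) (by decide)
  | succ n ih =>
    intro s hs pre
    by_cases h1 : PySem.Chars.startswith s ("../".toList) = true
    · rw [pvStripA, dif_pos h1, pvAltGo, dif_pos h1]
      have hlt : (PySem.List.slice s (some 3)).length ≤ n := by
        obtain ⟨t, ht⟩ := (PySem.Chars.startswith_iff _ _).mp h1
        rw [← ht, PySem.List.slice_from _ (by norm_num)]
        rw [← ht] at hs; simp at hs ⊢; omega
      rw [ih _ hlt (pre ++ "../".toList), Option.map_map]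
      congr 1; funext r; simp
    · by_cases h2 : PySem.Chars.startswith s ("./".toList) = true
      · rw [pvStripA, dif_neg h1, dif_pos h2, pvAltGo, dif_neg h1, dif_pos h2]
        have hlt : (PySem.List.slice s (some 2)).length ≤ n := by
          obtain ⟨t, ht⟩ := (PySem.Chars.startswith_iff _ _).mp h2
          rw [← ht, PySem.List.slice_from _ (by norm_num)]
          rw [← ht] at hs; simp at hs ⊢; omega
        rw [ih _ hlt (pre ++ "./".toList), Option.map_map]
        congr 1; funext r; simp
      · exact pvNoTok mapping pre s h1 h2

-- ===== VERDICT (by name: the statement is the Claim_ definition above) =====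
theorem apply_mapping_to_include_spec : Claim_equal_apply_mapping_to_include := by
  intro inc mapping _
  unfold Spec_apply_mapping_to_include
  rw [pvA_eq_tail, pvLoop_eq_alt mapping inc.toList.length inc.toList le_rfl]
  simp [apply_mapping_to_include_alt]
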